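-- pv_equiv track=rewrite | github.com/hunglaithe117-alt/build-risk-dashboard | backend/app/services/dataset_service.py | _guess_mapping
-- ===== SOURCE A (Python) =====
-- from typing import Dict, Optional, Sequence
--
-- def _guess_mapping(columns: Sequence[str]) -> Dict[str, Optional[str]]:
--     """Best-effort mapping for required fields based on column names."""
--
--     def find_match(options: Sequence[str]) -> Optional[str]:
--         lowered = [c.lower() for c in columns]
--         for opt in options:
--             if opt in lowered:
--                 return columns[lowered.index(opt)]
--         return None
--
--     return {
--         "build_id": find_match(["build_id", "build id", "id", "ci_run_id", "run_id"]),
--         "repo_name": find_match(["repo", "repository", "repo_name", "full_name", "project"]),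
--     }
-- ===== SOURCE B (Python) =====
-- from typing import Dict, Optional, Sequence
--
-- def _guess_mapping(columns: Sequence[str]) -> Dict[str, Optional[str]]:
--     """Best-effort mapping for required fields based on column names."""
--     # Single pass over columns maintaining the best (lowest-priority) candidate per
--     # field; strict '<' makes the first column win ties, matching option order.
--     build_opts = ["build_id", "build id", "id", "ci_run_id", "run_id"]
--     repo_opts = ["repo", "repository", "repo_name", "full_name", "project"]
--     build_pri = {o: i for i, o in enumerate(build_opts)}
--     repo_pri = {o: i for i, o in enumerate(repo_opts)}
--     best_build: Optional[str] = None
--     best_repo: Optional[str] = None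
--     pb = len(build_opts)
--     pr = len(repo_opts)
--     for c in columns:
--         low = c.lower()
--         i = build_pri.get(low)
--         if i is not None and i < pb:
--             best_build, pb = c, i
--         j = repo_pri.get(low)
--         if j is not None and j < pr:
--             best_repo, pr = c, j
--     return {"build_id": best_build, "repo_name": best_repo}
-- ===== Notes on version B (the rewrite author's own statement) =====
-- stated objective: faster
-- what changed: B inverts the loop structure: instead of A's option-major search (for each option, re-lower every column, scan for membership, then scan again with .index), B makes one column-major pass keeping the best-priority candidate per field via precomputed priority maps.
import Mathlib
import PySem

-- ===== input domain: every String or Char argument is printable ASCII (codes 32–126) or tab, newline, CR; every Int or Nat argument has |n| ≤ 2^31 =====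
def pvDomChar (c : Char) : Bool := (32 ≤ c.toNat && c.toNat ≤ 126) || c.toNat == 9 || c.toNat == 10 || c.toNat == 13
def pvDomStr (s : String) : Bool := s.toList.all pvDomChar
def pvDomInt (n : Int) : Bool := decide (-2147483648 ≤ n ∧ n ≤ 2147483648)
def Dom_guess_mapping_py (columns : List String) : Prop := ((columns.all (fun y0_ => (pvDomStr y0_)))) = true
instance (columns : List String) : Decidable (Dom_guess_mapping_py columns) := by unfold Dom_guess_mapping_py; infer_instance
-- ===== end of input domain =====

-- B inverts the loop structure: one column-major pass keeping the best-priority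
-- candidate per field (priority maps), instead of A's per-option scans; objective: faster.

-- ===== PORT A =====
-- A's inner find_match: `lowered = [c.lower() for c in columns]`, then for each
-- option, `if opt in lowered: return columns[lowered.index(opt)]`.
def findLoopA (columns lowered : List String) : List String → Option String
  | [] => none
  | o :: rest =>
      if o ∈ lowered then
        match PySem.List.index? lowered o with
        | some i => PySem.List.pyGet? columns (i : Int)
        | none => none
      else findLoopA columns lowered rest

def findMatchA (columns opts : List String) : Option String :=
  findLoopA columns (columns.map PySem.Str.lower) opts

def guess_mapping_py (columns : List String) : List (String × Option String) :=
  [("build_id", findMatchA columns ["build_id", "build id", "id", "ci_run_id", "run_id"]),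
   ("repo_name", findMatchA columns ["repo", "repository", "repo_name", "full_name", "project"])]

-- ===== PORT B =====
-- B: `build_pri = {o: i for i, o in enumerate(build_opts)}` — a priority dict per field.
def mkPri (opts : List String) : PySem.Dict String Int :=
  (PySem.List.enumerate opts).foldl (fun d p => d.insert p.2 p.1) PySem.Dict.empty

-- One field's share of the loop body: `i = pri.get(c.lower()); if i is not None and i < p: best, p = c, i`.
def fieldStep (pri : PySem.Dict String Int) (st : Option String × Int) (c : String) :
    Option String × Int :=
  match pri.get? (PySem.Str.lower c) with
  | some i => if i < st.2 then (some c, i) else st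
  | none => st

-- The loop body updates both fields' states from the same column.
def stepB (bpri rpri : PySem.Dict String Int)
    (st : (Option String × Int) × (Option String × Int)) (c : String) :
    (Option String × Int) × (Option String × Int) :=
  (fieldStep bpri st.1 c, fieldStep rpri st.2 c)

def guess_mapping_py_alt (columns : List String) : List (String × Option String) :=
  let buildOpts := ["build_id", "build id", "id", "ci_run_id", "run_id"]
  let repoOpts := ["repo", "repository", "repo_name", "full_name", "project"]
  let st := columns.foldl (stepB (mkPri buildOpts) (mkPri repoOpts))
      ((none, (buildOpts.length : Int)), (none, (repoOpts.length : Int)))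
  [("build_id", st.1.1), ("repo_name", st.2.1)]

-- ===== PRECONDITION & SPEC =====
def Spec_guess_mapping_py (columns : List String) (out : List (String × Option String)) : Prop := out = guess_mapping_py_alt columns
instance (columns : List String) (out : List (String × Option String)) : Decidable (Spec_guess_mapping_py columns out) := by unfold Spec_guess_mapping_py; infer_instance

-- ===== CLAIM (what is proved, stated in full; the proofs are below) =====
def Claim_equal_guess_mapping_py : Prop := ∀ (columns : List String), Dom_guess_mapping_py columns → Spec_guess_mapping_py columns (guess_mapping_py columns)

-- ===== LEMMAS AND PROOFS =====

-- Common reference: first option present among the lowered columns, resolved to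
-- the first column carrying it.
def specMatch (cols : List String) : List String → Option String
  | [] => none
  | o :: rest =>
      if o ∈ cols.map PySem.Str.lower then cols.find? (fun c => PySem.Str.lower c == o)
      else specMatch cols rest

-- A's `columns[lowered.index(opt)]` is the first column whose lowercase equals o.
theorem idx_get_eq_find (columns : List String) (o : String) :
    (PySem.List.index? (columns.map PySem.Str.lower) o).bind
        (fun i => PySem.List.pyGet? columns (i : Int))
      = columns.find? (fun c => PySem.Str.lower c == o) := by
  induction columns with
  | nil => rfl
  | cons c cs ih =>
      by_cases h : PySem.Str.lower c = o
      · subst h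
        rw [List.map_cons, PySem.List.index?_cons_self]
        simp
      · rw [List.map_cons, PySem.List.index?_cons_of_ne _ h, List.find?_cons_of_neg (by simp [h])]
        rw [← ih]
        cases hidx : PySem.List.index? (cs.map PySem.Str.lower) o with
        | none => simp
        | some i =>
            have : ((i + 1 : Nat) : Int) = (i : Int) + 1 := by push_cast; ring
            simp only [Option.map_some, Option.bind_some, this,
              PySem.List.pyGet?_cons_succ]

theorem A_eq_spec (cols opts : List String) :
    findMatchA cols opts = specMatch cols opts := by
  induction opts with
  | nil => rfl
  | cons o rest ih =>
      rw [findMatchA, findLoopA, specMatch]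
      by_cases hmem : o ∈ cols.map PySem.Str.lower
      · rw [if_pos hmem, if_pos hmem, ← idx_get_eq_find]
        rcases hidx : PySem.List.index? (cols.map PySem.Str.lower) o with _ | i
        · exact absurd hmem (by simpa using (PySem.List.index?_eq_none_iff _ _).mp hidx)
        · simp
      · rw [if_neg hmem, if_neg hmem, ← ih, findMatchA]

-- The combined loop is the product of the two per-field loops.
theorem foldl_pair (bpri rpri : PySem.Dict String Int) (cols : List String)
    (s t : Option String × Int) :
    cols.foldl (stepB bpri rpri) (s, t)
      = (cols.foldl (fieldStep bpri) s, cols.foldl (fieldStep rpri) t) := by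
  induction cols generalizing s t with
  | nil => rfl
  | cons c cs ih => simp [List.foldl_cons, stepB, ih]

-- The priority dict's lookup is the option's index (shifted by the start offset).
theorem get?_mkPriAux (opts : List String) (s : Int) (d : PySem.Dict String Int)
    (x : String) (h : opts.Nodup) :
    ((PySem.List.enumerate opts s).foldl (fun d p => d.insert p.2 p.1) d).get? x
      = match PySem.List.index? opts x with
        | some n => some (s + (n : Int))
        | none => d.get? x := by
  induction opts generalizing s d with
  | nil => simp [PySem.List.enumerate_nil, PySem.List.index?]
  | cons o rest ih =>
      rw [PySem.List.enumerate_cons, List.foldl_cons]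
      by_cases hx : x = o
      · subst hx
        rw [PySem.List.index?_cons_self, ih _ _ h.of_cons]
        have hnm : x ∉ rest := (List.nodup_cons.mp h).1
        rw [(PySem.List.index?_eq_none_iff rest x).mpr hnm]
        simp [PySem.Dict.get?_insert_self]
      · rw [PySem.List.index?_cons_of_ne _ (fun he => hx he.symm), ih _ _ h.of_cons]
        cases hidx : PySem.List.index? rest x with
        | none => simp [PySem.Dict.get?_insert_of_ne _ _ hx]
        | some n =>
            simp only [Option.map_some]
            have : ((n + 1 : Nat) : Int) = (n : Int) + 1 := by push_cast; ring
            rw [this]; congr 1; ring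

theorem get?_mkPri (opts : List String) (h : opts.Nodup) (x : String) :
    (mkPri opts).get? x = (PySem.List.index? opts x).map (fun n => (n : Int)) := by
  rw [mkPri, get?_mkPriAux opts 0 _ x h]
  cases hidx : PySem.List.index? opts x <;> simp

-- Once the best priority is 0 nothing can improve it.
theorem fold_freeze (pri : PySem.Dict String Int)
    (hnn : ∀ x i, pri.get? x = some i → 0 ≤ i) (cols : List String) (b : Option String) :
    cols.foldl (fieldStep pri) (b, 0) = (b, 0) := by
  induction cols with
  | nil => rfl
  | cons c cs ih =>
      rw [List.foldl_cons]
      have hstep : fieldStep pri (b, 0) c = (b, 0) := by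
        unfold fieldStep
        cases hg : pri.get? (PySem.Str.lower c) with
        | none => rfl
        | some i =>
            have := hnn _ _ hg
            simp only [if_neg (by omega : ¬ i < (0:Int))]
      rw [hstep, ih]

-- If some column matches the priority-0 option, the fold returns the first such column.
theorem fold_zero (pri : PySem.Dict String Int) (o : String)
    (hzero : ∀ x, pri.get? x = some 0 ↔ x = o)
    (hnn : ∀ x i, pri.get? x = some i → 0 ≤ i) :
    ∀ (cols : List String) (b : Option String) (p : Int), 0 < p →
      o ∈ cols.map PySem.Str.lower →
      (cols.foldl (fieldStep pri) (b, p)).1 = cols.find? (fun c => PySem.Str.lower c == o) := by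
  intro cols
  induction cols with
  | nil => intro b p _ hmem; simp at hmem
  | cons c cs ih =>
      intro b p hp hmem
      rw [List.foldl_cons]
      by_cases hc : PySem.Str.lower c = o
      · have hg : pri.get? (PySem.Str.lower c) = some 0 := (hzero _).mpr hc
        have hstep : fieldStep pri (b, p) c = (some c, 0) := by
          unfold fieldStep; rw [hg]; simp [hp]
        rw [hstep, fold_freeze pri hnn, List.find?_cons_of_pos (by simp [hc])]
      · rw [List.find?_cons_of_neg (by simp [hc])]
        rw [List.map_cons] at hmem
        have hmem' : o ∈ cs.map PySem.Str.lower := by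
          rcases List.mem_cons.mp hmem with h | h
          · exact absurd h.symm hc
          · exact h
        cases hg : pri.get? (PySem.Str.lower c) with
        | none =>
            have hstep : fieldStep pri (b, p) c = (b, p) := by
              unfold fieldStep; rw [hg]
            rw [hstep]; exact ih b p hp hmem'
        | some i =>
            have hi0 : i ≠ 0 := fun h0 => hc ((hzero _).mp (h0 ▸ hg))
            have hinn := hnn _ _ hg
            have hstep : fieldStep pri (b, p) c = if i < p then (some c, i) else (b, p) := by
              unfold fieldStep; rw [hg]
            rw [hstep]
            by_cases hlt : i < p
            · rw [if_pos hlt]; exact ih (some c) i (by omega) hmem'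
            · rw [if_neg hlt]; exact ih b p hp hmem'

-- Dropping the head option shifts every priority (and the sentinel) by one.
theorem fold_shift (priL priR : PySem.Dict String Int) (cols : List String)
    (hrel : ∀ c ∈ cols,
      priL.get? (PySem.Str.lower c) = (priR.get? (PySem.Str.lower c)).map (· + 1)) :
    ∀ (b : Option String) (p : Int),
      cols.foldl (fieldStep priL) (b, p + 1)
        = ((cols.foldl (fieldStep priR) (b, p)).1,
           (cols.foldl (fieldStep priR) (b, p)).2 + 1) := by
  induction cols with
  | nil => intro b p; rfl
  | cons c cs ih =>
      intro b p
      have hrel' : ∀ c ∈ cs, priL.get? (PySem.Str.lower c)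
          = (priR.get? (PySem.Str.lower c)).map (· + 1) :=
        fun c hc => hrel c (List.mem_cons_of_mem _ hc)
      rw [List.foldl_cons, List.foldl_cons]
      have hL := hrel c (List.mem_cons_self ..)
      show (cs.foldl (fieldStep priL) (fieldStep priL (b, p + 1) c)) = _
      unfold fieldStep
      rw [hL]
      cases hg : priR.get? (PySem.Str.lower c) with
      | none => exact ih hrel' b p
      | some i =>
          simp only [Option.map_some]
          by_cases hlt : i < p
          · rw [if_pos (by omega : i + 1 < p + 1), if_pos hlt]
            exact ih hrel' (some c) i
          · rw [if_neg (by omega : ¬ i + 1 < p + 1), if_neg hlt]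
            exact ih hrel' b p

-- B's per-field fold computes the reference specMatch.
theorem fold_eq_spec (opts : List String) (h : opts.Nodup) (cols : List String) :
    (cols.foldl (fieldStep (mkPri opts)) (none, (opts.length : Int))).1
      = specMatch cols opts := by
  induction opts with
  | nil =>
      have : cols.foldl (fieldStep (mkPri [])) (none, (0:Int)) = (none, 0) := by
        apply fold_freeze
        intro x i hg
        rw [get?_mkPri [] (by simp) x] at hg
        simp [PySem.List.index?] at hg
      simp only [List.length_nil, Nat.cast_zero, this]; rfl
  | cons o rest ih =>
      rw [specMatch]
      by_cases hmem : o ∈ cols.map PySem.Str.lower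
      · rw [if_pos hmem]
        apply fold_zero (mkPri (o :: rest)) o _ _ cols none _ (by exact_mod_cast Nat.succ_pos rest.length) hmem
        · intro x
          rw [get?_mkPri _ h x]
          constructor
          · intro hx
            by_cases hxo : x = o
            · exact hxo
            · exfalso
              rw [PySem.List.index?_cons_of_ne _ (fun he => hxo he.symm)] at hx
              cases hidx : PySem.List.index? rest x with
              | none => rw [hidx] at hx; simp at hx
              | some n => rw [hidx] at hx; simp at hx; omega
          · intro hx; subst hx; rw [PySem.List.index?_cons_self]; rfl
        · intro x i hg
          rw [get?_mkPri _ h x] at hg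
          cases hidx : PySem.List.index? (o :: rest) x with
          | none => rw [hidx] at hg; simp at hg
          | some n => rw [hidx] at hg; simp at hg; omega
      · rw [if_neg hmem]
        have hrel : ∀ c ∈ cols, (mkPri (o :: rest)).get? (PySem.Str.lower c)
            = ((mkPri rest).get? (PySem.Str.lower c)).map (· + 1) := by
          intro c hc
          have hco : PySem.Str.lower c ≠ o := by
            intro he; exact hmem (he ▸ List.mem_map_of_mem hc)
          rw [get?_mkPri _ h, get?_mkPri _ h.of_cons,
            PySem.List.index?_cons_of_ne _ (fun he => hco he.symm)]
          cases PySem.List.index? rest (PySem.Str.lower c) with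
          | none => rfl
          | some n => simp
        have hlen : ((o :: rest).length : Int) = (rest.length : Int) + 1 := by
          push_cast [List.length_cons]; ring
        rw [hlen, fold_shift (mkPri (o :: rest)) (mkPri rest) cols hrel none
          (rest.length : Int)]
        exact ih h.of_cons

-- ===== VERDICT (by name: the statement is the Claim_ definition above) =====
theorem guess_mapping_py_spec : Claim_equal_guess_mapping_py := by
  intro columns _
  unfold Spec_guess_mapping_py guess_mapping_py guess_mapping_py_alt
  simp only [foldl_pair, A_eq_spec]
  rw [fold_eq_spec _ (by decide) columns, fold_eq_spec _ (by decide) columns]
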